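-- pv_equiv track=rewrite | github.com/cxhx441/advent_of_code | 2024/d15.py | upsize_grid
-- ===== SOURCE A (Python) =====
-- def upsize_grid(grid):
--     upsized_grid = []
--     ROWS, COLS = len(grid), len(grid[0])
--     for r in range(ROWS):
--         row = []
--         for c in range(COLS):
--            """  If the tile is #, the new map contains ## instead.
--                 If the tile is O, the new map contains [] instead.
--                 If the tile is ., the new map contains .. instead.
--                 If the tile is @, the new map contains @. instead.
--            """
--            if grid[r][c] == '#':
--                row.extend(['#', '#'])
--            elif grid[r][c] == 'O':
--                row.extend(['[', ']'])
--            elif grid[r][c] == '.':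
--                row.extend(['.', '.'])
--            elif grid[r][c] == '@':
--                row.extend(['@', '.'])
--         upsized_grid.append(row)
--     return upsized_grid
-- ===== SOURCE B (Python) =====
-- LEFT = {'#': '#', 'O': '[', '.': '.', '@': '@'}
-- RIGHT = {'#': '#', 'O': ']', '.': '.', '@': '.'}
--
--
-- def upsize_grid(grid):
--     out = []
--     for row in grid:
--         tiles = [c for c in row if c in LEFT]
--         lefts = [LEFT[c] for c in tiles]
--         rights = [RIGHT[c] for c in tiles]
--         out.append([ch for pair in zip(lefts, rights) for ch in pair])
--     return out
-- ===== Notes on version B (the rewrite author's own statement) =====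
-- stated objective: alternative
-- what changed: Instead of A's nested index loops with an if/elif cascade extending one accumulator, B filters each row to its recognised tiles, builds the left-half and right-half character columns as two separate mapped lists, and interleaves them with zip; Pre_ excludes the empty grid and grids with a row shorter than the first (A raises IndexError there).
-- intended difference: On grids where some row carries a recognised tile ('#','O','.','@') at an index >= len(grid[0]), A silently truncates that row to the first row's width (an artefact of COLS = len(grid[0])), while B expands every tile of the row; expanding the whole grid is the intended behaviour. — e.g. on upsize_grid([["#"], ["O", "."]]): A returns [["#", "#"], ["[", "]"]], B returns [["#", "#"], ["[", "]", ".", "."]]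
import Mathlib
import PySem

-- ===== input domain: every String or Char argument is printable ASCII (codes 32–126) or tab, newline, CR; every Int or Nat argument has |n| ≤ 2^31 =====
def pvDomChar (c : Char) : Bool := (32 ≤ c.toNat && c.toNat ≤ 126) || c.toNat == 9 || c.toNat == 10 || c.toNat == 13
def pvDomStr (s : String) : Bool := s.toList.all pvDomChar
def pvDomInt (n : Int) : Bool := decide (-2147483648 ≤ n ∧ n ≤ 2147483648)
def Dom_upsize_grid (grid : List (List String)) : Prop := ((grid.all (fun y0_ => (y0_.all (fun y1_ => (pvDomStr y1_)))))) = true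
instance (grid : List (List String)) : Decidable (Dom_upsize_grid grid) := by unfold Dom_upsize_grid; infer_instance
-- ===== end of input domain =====

-- B filters each row to its recognised tiles and interleaves two mapped
-- half-columns with zip, instead of A's nested index loops with a branch
-- cascade; return-value equivalence outside D_ (A truncates ragged rows there).

-- ===== PORT A =====
def upsize_grid (grid : List (List String)) : List (List String) :=
  let ROWS : Int := grid.length
  let COLS : Int := (PySem.List.pyGetD grid 0 []).length
  (PySem.List.pyRange 0 ROWS 1).foldl (fun upsized r =>
    let rw := PySem.List.pyGetD grid r []
    let row := (PySem.List.pyRange 0 COLS 1).foldl (fun row c =>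
      let cell := PySem.List.pyGetD rw c ""
      if cell = "#" then row ++ ["#", "#"]
      else if cell = "O" then row ++ ["[", "]"]
      else if cell = "." then row ++ [".", "."]
      else if cell = "@" then row ++ ["@", "."]
      else row) []
    upsized ++ [row]) []

-- ===== PORT B =====
def pvLEFT : PySem.Dict String String :=
  PySem.Dict.ofList [("#", "#"), ("O", "["), (".", "."), ("@", "@")]
def pvRIGHT : PySem.Dict String String :=
  PySem.Dict.ofList [("#", "#"), ("O", "]"), (".", "."), ("@", ".")]

-- LEFT[c]/RIGHT[c] are ported with getD "" : the key is always present (c was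
-- filtered by 'c in LEFT'), so the default is never used.
def upsize_grid_alt (grid : List (List String)) : List (List String) :=
  grid.foldl (fun out row =>
    let tiles := row.filter (fun c => (PySem.Dict.get? pvLEFT c).isSome)
    let lefts := tiles.map (fun c => PySem.Dict.getD pvLEFT c "")
    let rights := tiles.map (fun c => PySem.Dict.getD pvRIGHT c "")
    out ++ [(lefts.zip rights).flatMap (fun p => [p.1, p.2])]) []

-- ===== PRECONDITION & SPEC =====
-- Pre_ excludes exactly the inputs on which A raises IndexError: the empty
-- grid (grid[0]) and grids with a row shorter than the first row (grid[r][c]).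
def Pre_upsize_grid (grid : List (List String)) : Prop :=
  grid ≠ [] ∧ ∀ row ∈ grid, (grid.headD []).length ≤ row.length
instance (grid : List (List String)) : Decidable (Pre_upsize_grid grid) := by
  unfold Pre_upsize_grid; infer_instance

def pvWitness_upsize_grid : List (List String) := [["#", "O"], [".", "@"]]

-- On grids where some row carries a recognised tile ('#','O','.','@') at an
-- index ≥ len(grid[0]), A silently truncates that row to the first row's width
-- (an artefact of COLS = len(grid[0])), while B expands every tile of the row;
-- expanding the whole grid is the intended behaviour.
def D_upsize_grid (grid : List (List String)) : Prop :=
  grid ≠ [] ∧ ∃ row ∈ grid, ∃ c ∈ row.drop (grid.headD []).length,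
    (c = "#" ∨ c = "O" ∨ c = "." ∨ c = "@")
instance (grid : List (List String)) : Decidable (D_upsize_grid grid) := by
  unfold D_upsize_grid; infer_instance

def Spec_upsize_grid (grid : List (List String)) (out : List (List String)) : Prop := ¬ D_upsize_grid grid → out = upsize_grid_alt grid
instance (grid : List (List String)) (out : List (List String)) : Decidable (Spec_upsize_grid grid out) := by unfold Spec_upsize_grid; infer_instance

def pvDiffWitness_upsize_grid : List (List String) := [["#"], ["O", "."]]
def pvDiffWitnessOut_upsize_grid : (List (List String)) × (List (List String)) :=
  ([["#", "#"], ["[", "]"]], [["#", "#"], ["[", "]", ".", "."]])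

-- ===== CLAIM (what is proved, stated in full; the proofs are below) =====
def Claim_unchanged_upsize_grid : Prop := ∀ (grid : List (List String)), Dom_upsize_grid grid → Pre_upsize_grid grid → Spec_upsize_grid grid (upsize_grid grid)
def Claim_changed_upsize_grid : Prop := Dom_upsize_grid (pvDiffWitness_upsize_grid) ∧ Pre_upsize_grid (pvDiffWitness_upsize_grid) ∧ D_upsize_grid (pvDiffWitness_upsize_grid) ∧ upsize_grid (pvDiffWitness_upsize_grid) = pvDiffWitnessOut_upsize_grid.1 ∧ upsize_grid_alt (pvDiffWitness_upsize_grid) = pvDiffWitnessOut_upsize_grid.2 ∧ pvDiffWitnessOut_upsize_grid.1 ≠ pvDiffWitnessOut_upsize_grid.2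
def Claim_exact_upsize_grid : Prop := ∀ (grid : List (List String)), Dom_upsize_grid grid → Pre_upsize_grid grid → D_upsize_grid grid → upsize_grid grid ≠ upsize_grid_alt grid

-- ===== LEMMAS AND PROOFS =====

-- 'expand': what A's branch cascade appends for one cell.
def pvExpand (c : String) : List String :=
  if c = "#" then ["#", "#"]
  else if c = "O" then ["[", "]"]
  else if c = "." then [".", "."]
  else if c = "@" then ["@", "."]
  else []

def pvKnown (c : String) : Bool := (PySem.Dict.get? pvLEFT c).isSome

theorem known_iff (c : String) :
    pvKnown c = true ↔ (c = "#" ∨ c = "O" ∨ c = "." ∨ c = "@") := by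
  constructor
  · intro h
    by_contra hn
    push Not at hn
    obtain ⟨h1, h2, h3, h4⟩ := hn
    have b1 : ("#" == c) = false := beq_eq_false_iff_ne.mpr (Ne.symm h1)
    have b2 : ("O" == c) = false := beq_eq_false_iff_ne.mpr (Ne.symm h2)
    have b3 : ("." == c) = false := beq_eq_false_iff_ne.mpr (Ne.symm h3)
    have b4 : ("@" == c) = false := beq_eq_false_iff_ne.mpr (Ne.symm h4)
    have hM : pvLEFT = PySem.Dict.mk [("#", "#"), ("O", "["), (".", "."), ("@", "@")] := by decide
    unfold pvKnown at h
    rw [hM] at h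
    simp only [PySem.Dict.get?_mk_cons, b1, b2, b3, b4, Bool.false_eq_true, if_false] at h
    simp [PySem.Dict.get?] at h
  · intro h
    rcases h with h | h | h | h <;> subst h <;> decide

-- B's per-tile pair equals A's cascade expansion on recognised tiles.
theorem pair_eq_expand (c : String) (h : pvKnown c = true) :
    [PySem.Dict.getD pvLEFT c "", PySem.Dict.getD pvRIGHT c ""] = pvExpand c := by
  rcases (known_iff c).mp h with h | h | h | h <;> subst h <;> decide

theorem expand_nil_of_unknown (c : String) (h : pvKnown c = false) : pvExpand c = [] := by
  have : ¬ (c = "#" ∨ c = "O" ∨ c = "." ∨ c = "@") := by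
    intro hc; rw [← known_iff] at hc; simp [hc] at h
  push Not at this
  obtain ⟨h1, h2, h3, h4⟩ := this
  simp [pvExpand, h1, h2, h3, h4]

-- A's inner index loop over range(w) equals flatMap of pvExpand over row[:w].
theorem innerA_eq_flatMap (rw : List String) (w : Nat) (h : w ≤ rw.length) :
    (PySem.List.pyRange 0 (w : Int) 1).foldl (fun row c =>
      let cell := PySem.List.pyGetD rw c ""
      if cell = "#" then row ++ ["#", "#"]
      else if cell = "O" then row ++ ["[", "]"]
      else if cell = "." then row ++ [".", "."]
      else if cell = "@" then row ++ ["@", "."]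
      else row) []
    = (rw.take w).flatMap pvExpand := by
  have hlen : ((w : Int)) = ((rw.take w).length : Int) := by
    simp [List.length_take, Nat.min_eq_left h]
  have hcong1 : ∀ (acc : List String) (c : Int), c ∈ PySem.List.pyRange 0 (w : Int) 1 →
      (let cell := PySem.List.pyGetD rw c ""
       if cell = "#" then acc ++ ["#", "#"]
       else if cell = "O" then acc ++ ["[", "]"]
       else if cell = "." then acc ++ [".", "."]
       else if cell = "@" then acc ++ ["@", "."]
       else acc)
      = (let cell := PySem.List.pyGetD (rw.take w) c ""
         if cell = "#" then acc ++ ["#", "#"]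
         else if cell = "O" then acc ++ ["[", "]"]
         else if cell = "." then acc ++ [".", "."]
         else if cell = "@" then acc ++ ["@", "."]
         else acc) := by
    intro acc c hc
    rw [PySem.List.mem_pyRange_one] at hc
    obtain ⟨k, rfl⟩ : ∃ k : Nat, c = (k : Int) := ⟨c.toNat, (Int.toNat_of_nonneg hc.1).symm⟩
    have hk : k < w := by exact_mod_cast hc.2
    have hg : PySem.List.pyGetD rw (k : Int) "" = PySem.List.pyGetD (rw.take w) (k : Int) "" := by
      rw [PySem.List.pyGetD_natCast, PySem.List.pyGetD_natCast]
      simp [List.getD_eq_getElem?_getD, hk]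
    simp only [hg]
  refine Eq.trans (PySem.List.foldl_congr_mem _ _ _ _ hcong1) ?_
  have e := PySem.List.foldl_pyRange_zero_pyGetD' (rw.take w) "" (fun row cell =>
      if cell = "#" then row ++ ["#", "#"]
      else if cell = "O" then row ++ ["[", "]"]
      else if cell = "." then row ++ [".", "."]
      else if cell = "@" then row ++ ["@", "."]
      else row) []
  rw [← hlen] at e
  refine Eq.trans e ?_
  have hcong2 : ∀ (acc : List String) (cell : String), cell ∈ rw.take w →
      (if cell = "#" then acc ++ ["#", "#"]
       else if cell = "O" then acc ++ ["[", "]"]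
       else if cell = "." then acc ++ [".", "."]
       else if cell = "@" then acc ++ ["@", "."]
       else acc)
      = acc ++ pvExpand cell := by
    intro acc cell _
    unfold pvExpand
    split_ifs <;> simp
  refine Eq.trans (PySem.List.foldl_congr_mem _ _ _ _ hcong2) ?_
  exact PySem.List.foldl_append_eq_flatMap _ _ _

-- B's zip-of-two-maps row equals flatMap of pvExpand over the whole row.
theorem rowB_eq_flatMap (rw : List String) :
    (((rw.filter pvKnown).map (fun c => PySem.Dict.getD pvLEFT c "")).zip
      ((rw.filter pvKnown).map (fun c => PySem.Dict.getD pvRIGHT c ""))).flatMap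
        (fun p => [p.1, p.2])
    = rw.flatMap pvExpand := by
  induction rw with
  | nil => simp
  | cons a l ih =>
    by_cases h : pvKnown a = true
    · simp only [List.filter_cons, h, if_true, List.map_cons, List.zip_cons_cons,
        List.flatMap_cons]
      rw [ih, ← pair_eq_expand a h]
    · have hf : pvKnown a = false := by simpa using h
      simp only [List.filter_cons, hf, Bool.false_eq_true, if_false, List.flatMap_cons,
        expand_nil_of_unknown a hf, List.nil_append]
      exact ih

theorem expand_ne_nil (c : String) (h : pvKnown c = true) : pvExpand c ≠ [] := by
  rcases (known_iff c).mp h with h | h | h | h <;> subst h <;> decide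

-- A on a grid satisfying Pre_: each row is the expansion of its first-width prefix.
theorem A_char (grid : List (List String)) (hne : grid ≠ [])
    (hlen : ∀ row ∈ grid, (grid.headD []).length ≤ row.length) :
    upsize_grid grid = grid.map (fun rw => (rw.take (grid.headD []).length).flatMap pvExpand) := by
  unfold upsize_grid
  have hhead : PySem.List.pyGetD grid 0 [] = grid.headD [] := by
    cases grid with
    | nil => simp at hne
    | cons a l => simp [PySem.List.pyGetD, PySem.List.pyGet?, PySem.List.pyIdx?]
  simp only [hhead]
  have e := PySem.List.foldl_pyRange_zero_pyGetD' grid ([] : List String) (fun upsized rw =>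
      upsized ++ [(PySem.List.pyRange 0 (((grid.headD []).length : Nat) : Int) 1).foldl (fun row c =>
        let cell := PySem.List.pyGetD rw c ""
        if cell = "#" then row ++ ["#", "#"]
        else if cell = "O" then row ++ ["[", "]"]
        else if cell = "." then row ++ [".", "."]
        else if cell = "@" then row ++ ["@", "."]
        else row) []]) []
  refine Eq.trans e ?_
  rw [PySem.List.foldl_append_singleton_eq_map]
  simp only [List.nil_append]
  apply List.map_congr_left
  intro rw hrw
  exact innerA_eq_flatMap rw (grid.headD []).length (hlen rw hrw)

-- B: each row is the expansion of the whole row.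
theorem B_char (grid : List (List String)) :
    upsize_grid_alt grid = grid.map (fun rw => rw.flatMap pvExpand) := by
  unfold upsize_grid_alt
  rw [show (fun c : String => (PySem.Dict.get? pvLEFT c).isSome) = pvKnown from rfl]
  rw [PySem.List.foldl_append_singleton_eq_map]
  simp only [List.nil_append]
  apply List.map_congr_left
  intro rw _
  exact rowB_eq_flatMap rw

-- ===== VERDICT (by name: the statement is the Claim_ definition above) =====
theorem upsize_grid_spec : Claim_unchanged_upsize_grid := by
  intro grid _ hpre hnd
  obtain ⟨hne, hlen⟩ := hpre
  rw [A_char grid hne hlen, B_char grid]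
  apply List.map_congr_left
  intro rw hrw
  have hsplit : rw.flatMap pvExpand
      = (rw.take (grid.headD []).length).flatMap pvExpand
        ++ (rw.drop (grid.headD []).length).flatMap pvExpand := by
    conv_lhs => rw [← List.take_append_drop (grid.headD []).length rw]
    rw [List.flatMap_append]
  have hdrop : (rw.drop (grid.headD []).length).flatMap pvExpand = [] := by
    rw [List.flatMap_eq_nil_iff]
    intro c hc
    by_contra h
    have hk : pvKnown c = true := by
      cases hkc : pvKnown c with
      | true => rfl
      | false => exact absurd (expand_nil_of_unknown c hkc) h
    exact hnd ⟨hne, rw, hrw, c, hc, (known_iff c).mp hk⟩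
  rw [hsplit, hdrop, List.append_nil]

theorem upsize_grid_changed : Claim_changed_upsize_grid := by
  unfold Claim_changed_upsize_grid; decide

theorem upsize_grid_tight : Claim_exact_upsize_grid := by
  intro grid _ hpre hd heq
  obtain ⟨hne, hlen⟩ := hpre
  obtain ⟨_, rho, hrho, c, hc, hcor⟩ := hd
  rw [A_char grid hne hlen, B_char grid] at heq
  obtain ⟨i, hi, hget⟩ := List.mem_iff_getElem.mp hrho
  have hrow : (rho.take (grid.headD []).length).flatMap pvExpand = rho.flatMap pvExpand := by
    have := congrArg (fun l => l[i]?) heq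
    simp only [List.getElem?_map] at this
    rw [List.getElem?_eq_getElem hi, hget] at this
    simpa using this
  have hsplit : rho.flatMap pvExpand
      = (rho.take (grid.headD []).length).flatMap pvExpand
        ++ (rho.drop (grid.headD []).length).flatMap pvExpand := by
    conv_lhs => rw [← List.take_append_drop (grid.headD []).length rho]
    rw [List.flatMap_append]
  rw [hsplit] at hrow
  have hnil : (rho.drop (grid.headD []).length).flatMap pvExpand = [] :=
    (List.self_eq_append_right.mp hrow)
  rw [List.flatMap_eq_nil_iff] at hnil
  exact expand_ne_nil c ((known_iff c).mpr hcor) (hnil c hc)
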